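-- pv_equiv track=rewrite | github.com/fantasylsc/LeetCode | Approach/Interview/Min_Amplitude.py | minAmplitude
-- ===== SOURCE A (Python) =====
-- def minAmplitude(s):
--     '''
--     : type s: List
--     : rtype : int
--
--     '''
--
--     n = len(s)
--     if n <= 4:
--         return 0
--
--     s1 = s[0: 4]
--     s1.sort()
--     max1, max2, max3, max4 = s1[3], s1[2], s1[1], s1[0]
--     min1, min2, min3, min4 = s1[0], s1[1], s1[2], s1[3]
--
--     for i in range(4, n):
--         if s[i] > max1:
--             max4 = max3
--             max3 = max2
--             max2 = max1
--             max1 = s[i]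
--         elif s[i] > max2:
--             max4 = max3
--             max3 = max2
--             max2 = s[i]
--         elif s[i] > max3:
--             max4 = max3
--             max3 = s[i]
--         elif s[i] > max4:
--             max4 = s[i]
--
--         if s[i] < min1:
--             min4 = min3
--             min3 = min2
--             min2 = min1
--             min1 = s[i]
--         elif s[i] < min2:
--             min4 = min3
--             min3 = min2
--             min2 = s[i]
--         elif s[i] < min3:
--             min4 = min3
--             min3 = s[i]
--         elif s[i] < min4:
--             min4 = s[i]
--
--     # res = float('inf')
--
--     res = min(max4 - min1, max1 - min4, max3 - min2, max2 - min3)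
--
--     return res
-- ===== SOURCE B (Python) =====
-- def minAmplitude(s):
--     n = len(s)
--     if n <= 4:
--         return 0
--     t = sorted(s)
--     return min(t[-4] - t[0], t[-1] - t[3], t[-3] - t[1], t[-2] - t[2])
-- ===== Notes on version B (the rewrite author's own statement) =====
-- stated objective: simpler
-- what changed: Replaces the single-pass top-four/bottom-four tracker (a nested-branch state machine) with sorting a copy of the list and taking the minimum of the four fixed differences that pair the sorted list's largest entries with its smallest ones.
import Mathlib
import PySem

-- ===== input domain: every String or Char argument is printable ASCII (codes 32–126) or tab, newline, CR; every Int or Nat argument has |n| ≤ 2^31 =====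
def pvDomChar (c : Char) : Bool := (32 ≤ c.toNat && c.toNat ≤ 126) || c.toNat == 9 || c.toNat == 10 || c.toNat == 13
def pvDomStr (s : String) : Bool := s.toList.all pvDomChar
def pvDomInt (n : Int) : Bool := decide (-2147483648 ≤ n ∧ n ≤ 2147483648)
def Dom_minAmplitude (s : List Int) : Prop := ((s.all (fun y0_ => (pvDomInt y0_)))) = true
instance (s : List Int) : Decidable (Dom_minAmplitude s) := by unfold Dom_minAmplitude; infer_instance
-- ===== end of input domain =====

-- B replaces A's single-pass top-4/bottom-4 tracking state machine by sorting a copy of the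
-- list and taking the minimum of four fixed split differences (objective: simpler).
-- Neither version mutates its argument (A sorts a copied slice).

-- ===== PORT A =====

structure AmpState where
  max1 : Int
  max2 : Int
  max3 : Int
  max4 : Int
  min1 : Int
  min2 : Int
  min3 : Int
  min4 : Int
deriving Repr, DecidableEq

-- one iteration of A's loop body: the max-chain, then the min-chain, in A's branch order
def ampStep (st : AmpState) (x : Int) : AmpState :=
  let st1 :=
    if st.max1 < x then { st with max4 := st.max3, max3 := st.max2, max2 := st.max1, max1 := x }
    else if st.max2 < x then { st with max4 := st.max3, max3 := st.max2, max2 := x }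
    else if st.max3 < x then { st with max4 := st.max3, max3 := x }
    else if st.max4 < x then { st with max4 := x }
    else st
  if x < st1.min1 then { st1 with min4 := st1.min3, min3 := st1.min2, min2 := st1.min1, min1 := x }
  else if x < st1.min2 then { st1 with min4 := st1.min3, min3 := st1.min2, min2 := x }
  else if x < st1.min3 then { st1 with min4 := st1.min3, min3 := x }
  else if x < st1.min4 then { st1 with min4 := x }
  else st1

def minAmplitude (s : List Int) : Int :=
  let n : Int := s.length
  if n ≤ 4 then 0
  else
    let s1 := PySem.List.sorted (PySem.List.slice s (some 0) (some 4)) (fun x => x)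
    -- s1 has exactly 4 elements here, so the indices 0..3 are in range
    let st0 : AmpState :=
      ⟨PySem.List.pyGetD s1 3 0, PySem.List.pyGetD s1 2 0, PySem.List.pyGetD s1 1 0,
       PySem.List.pyGetD s1 0 0,
       PySem.List.pyGetD s1 0 0, PySem.List.pyGetD s1 1 0, PySem.List.pyGetD s1 2 0,
       PySem.List.pyGetD s1 3 0⟩
    -- for i in range(4, n): the loop reads s[4:] left to right
    let stf := (PySem.List.slice s (some 4) none).foldl ampStep st0
    min (min (min (stf.max4 - stf.min1) (stf.max1 - stf.min4)) (stf.max3 - stf.min2))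
        (stf.max2 - stf.min3)

-- ===== PORT B =====

def minAmplitude_alt (s : List Int) : Int :=
  let n : Int := s.length
  if n ≤ 4 then 0
  else
    let t := PySem.List.sorted s (fun x => x)
    -- n > 4, so all eight indices are in range
    min (min (min (PySem.List.pyGetD t (-4) 0 - PySem.List.pyGetD t 0 0)
                  (PySem.List.pyGetD t (-1) 0 - PySem.List.pyGetD t 3 0))
             (PySem.List.pyGetD t (-3) 0 - PySem.List.pyGetD t 1 0))
        (PySem.List.pyGetD t (-2) 0 - PySem.List.pyGetD t 2 0)

-- ===== PRECONDITION & SPEC =====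
def Spec_minAmplitude (s : List Int) (out : Int) : Prop := out = minAmplitude_alt s
instance (s : List Int) (out : Int) : Decidable (Spec_minAmplitude s out) := by unfold Spec_minAmplitude; infer_instance

-- ===== CLAIM (what is proved, stated in full; the proofs are below) =====
def Claim_equal_minAmplitude : Prop := ∀ (s : List Int), Dom_minAmplitude s → Spec_minAmplitude s (minAmplitude s)

-- ===== LEMMAS AND PROOFS =====

-- insertion into a sorted accumulator, as sorted() performs it
def ins (x : Int) (u : List Int) : List Int :=
  PySem.List.insertBy (fun a b => decide (a < b)) x u

-- negate and reverse: turns an ascending list into an ascending list of negations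
def negrev (u : List Int) : List Int := (u.map (fun y => -y)).reverse

def front4 (u : List Int) : Int × Int × Int × Int :=
  (u.getD 0 0, u.getD 1 0, u.getD 2 0, u.getD 3 0)

def minUpd (q : Int × Int × Int × Int) (x : Int) : Int × Int × Int × Int :=
  if x < q.1 then (x, q.1, q.2.1, q.2.2.1)
  else if x < q.2.1 then (q.1, x, q.2.1, q.2.2.1)
  else if x < q.2.2.1 then (q.1, q.2.1, x, q.2.2.1)
  else if x < q.2.2.2 then (q.1, q.2.1, q.2.2.1, x)
  else q

def maxUpd (q : Int × Int × Int × Int) (x : Int) : Int × Int × Int × Int :=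
  if q.1 < x then (x, q.1, q.2.1, q.2.2.1)
  else if q.2.1 < x then (q.1, x, q.2.1, q.2.2.1)
  else if q.2.2.1 < x then (q.1, q.2.1, x, q.2.2.1)
  else if q.2.2.2 < x then (q.1, q.2.1, q.2.2.1, x)
  else q

-- the invariant state read off a sorted list
def extract (u : List Int) : AmpState :=
  let q := front4 u
  let p := front4 (negrev u)
  ⟨-p.1, -p.2.1, -p.2.2.1, -p.2.2.2, q.1, q.2.1, q.2.2.1, q.2.2.2⟩

theorem ampStep_eq (st : AmpState) (x : Int) :
    ampStep st x =
      ⟨(maxUpd (st.max1, st.max2, st.max3, st.max4) x).1,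
       (maxUpd (st.max1, st.max2, st.max3, st.max4) x).2.1,
       (maxUpd (st.max1, st.max2, st.max3, st.max4) x).2.2.1,
       (maxUpd (st.max1, st.max2, st.max3, st.max4) x).2.2.2,
       (minUpd (st.min1, st.min2, st.min3, st.min4) x).1,
       (minUpd (st.min1, st.min2, st.min3, st.min4) x).2.1,
       (minUpd (st.min1, st.min2, st.min3, st.min4) x).2.2.1,
       (minUpd (st.min1, st.min2, st.min3, st.min4) x).2.2.2⟩ := by
  simp only [ampStep, maxUpd, minUpd]
  split_ifs <;> rfl

theorem ins_cons (x y : Int) (ys : List Int) :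
    ins x (y :: ys) = if x < y then x :: y :: ys else y :: ins x ys := by
  simp [ins, PySem.List.insertBy]

theorem ins_perm (x : Int) (u : List Int) : (ins x u).Perm (x :: u) := by
  induction u with
  | nil => simp [ins, PySem.List.insertBy]
  | cons y ys ih =>
    rw [ins_cons]
    split_ifs
    · exact List.Perm.refl _
    · exact (List.Perm.cons y ih).trans (List.Perm.swap x y ys)

theorem length_ins (x : Int) (u : List Int) : (ins x u).length = u.length + 1 := by
  simpa using (ins_perm x u).length_eq

theorem ins_sorted (x : Int) (u : List Int) (hs : u.Pairwise (· ≤ ·)) :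
    (ins x u).Pairwise (· ≤ ·) := by
  induction u with
  | nil => simp [ins, PySem.List.insertBy]
  | cons y ys ih =>
    rw [ins_cons]
    rcases List.pairwise_cons.mp hs with ⟨hy, hys⟩
    split_ifs with hxy
    · refine List.pairwise_cons.mpr ⟨?_, hs⟩
      intro z hz
      rcases List.mem_cons.mp hz with h | h
      · exact h ▸ le_of_lt hxy
      · exact (le_of_lt hxy).trans (hy z h)
    · refine List.pairwise_cons.mpr ⟨?_, ih hys⟩
      intro z hz
      rcases (PySem.List.mem_insertBy _ _ _ _).mp hz with h | h
      · exact h ▸ not_lt.mp hxy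
      · exact hy _ h

theorem negrev_sorted (u : List Int) (hs : u.Pairwise (· ≤ ·)) :
    (negrev u).Pairwise (· ≤ ·) := by
  unfold negrev
  rw [List.pairwise_reverse, List.pairwise_map]
  exact hs.imp (by intro a b h; simpa using h)

theorem negrev_perm_negmap (u : List Int) : (negrev u).Perm (u.map (fun y => -y)) :=
  List.reverse_perm _

theorem length_negrev (u : List Int) : (negrev u).length = u.length := by
  simp [negrev]

-- the mirror lemma: negrev intertwines insertion of x with insertion of -x
theorem negrev_ins (x : Int) (u : List Int) (hs : u.Pairwise (· ≤ ·)) :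
    negrev (ins x u) = ins (-x) (negrev u) := by
  have p1 : (negrev (ins x u)).Perm (-x :: negrev u) := by
    refine ((negrev_perm_negmap (ins x u)).trans ((ins_perm x u).map _)).trans ?_
    exact List.Perm.cons _ (negrev_perm_negmap u).symm
  have p2 : (ins (-x) (negrev u)).Perm (-x :: negrev u) := ins_perm _ _
  exact List.Perm.eq_of_pairwise (fun a b _ _ h1 h2 => le_antisymm h1 h2)
    (negrev_sorted _ (ins_sorted x u hs)) (ins_sorted _ _ (negrev_sorted u hs))
    (p1.trans p2.symm)

theorem front4_cons (a b c d : Int) (r : List Int) :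
    front4 (a :: b :: c :: d :: r) = (a, b, c, d) := rfl

theorem front4_ins (a b c d x : Int) (r : List Int) :
    front4 (ins x (a :: b :: c :: d :: r)) = minUpd (a, b, c, d) x := by
  simp only [ins_cons, minUpd]
  split_ifs <;> simp [front4_cons]

theorem neg_minUpd (a b c d x : Int) :
    maxUpd (-a, -b, -c, -d) x =
      (-(minUpd (a, b, c, d) (-x)).1, -(minUpd (a, b, c, d) (-x)).2.1,
       -(minUpd (a, b, c, d) (-x)).2.2.1, -(minUpd (a, b, c, d) (-x)).2.2.2) := by
  simp only [maxUpd, minUpd]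
  split_ifs <;> simp_all <;> omega

-- a list of length ≥ 4 decomposes
theorem four_decomp (u : List Int) (h4 : 4 ≤ u.length) :
    ∃ a b c d r, u = a :: b :: c :: d :: r := by
  match u, h4 with
  | a :: b :: c :: d :: r, _ => exact ⟨a, b, c, d, r, rfl⟩

theorem step_extract (u : List Int) (hs : u.Pairwise (· ≤ ·)) (h4 : 4 ≤ u.length) (x : Int) :
    ampStep (extract u) x = extract (ins x u) := by
  obtain ⟨a, b, c, d, r, hu⟩ := four_decomp u h4
  have h4' : 4 ≤ (negrev u).length := by rw [length_negrev]; exact h4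
  obtain ⟨a', b', c', d', r', hv⟩ := four_decomp (negrev u) h4'
  have hmin : front4 (ins x u) = minUpd (a, b, c, d) x := by
    rw [hu, front4_ins]
  have hmax : front4 (negrev (ins x u)) = minUpd (a', b', c', d') (-x) := by
    rw [negrev_ins x u hs, hv, front4_ins]
  have hfq : front4 u = (a, b, c, d) := by rw [hu, front4_cons]
  have hfp : front4 (negrev u) = (a', b', c', d') := by rw [hv, front4_cons]
  rw [ampStep_eq]
  simp only [extract, hfq, hfp, hmin, hmax, neg_minUpd]

theorem fold_extract (l : List Int) (u : List Int) (hs : u.Pairwise (· ≤ ·))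
    (h4 : 4 ≤ u.length) :
    l.foldl ampStep (extract u) = extract (l.foldl (fun acc x => ins x acc) u) := by
  induction l generalizing u with
  | nil => rfl
  | cons x l ih =>
    rw [List.foldl_cons, List.foldl_cons, step_extract u hs h4 x]
    exact ih (ins x u) (ins_sorted x u hs) (by rw [length_ins]; omega)

-- sorted with the identity key is the left fold of ins
theorem sorted_eq_foldl_ins (xs : List Int) :
    PySem.List.sorted xs (fun x => x) = xs.foldl (fun acc x => ins x acc) [] := rfl

theorem minAmplitude_eq_alt (s : List Int) : minAmplitude s = minAmplitude_alt s := by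
  unfold minAmplitude minAmplitude_alt
  by_cases hn : (s.length : Int) ≤ 4
  · simp [hn]
  · simp only [hn, if_false]
    have hlen : 5 ≤ s.length := by omega
    -- the slices
    have hsl1 : PySem.List.slice s (some 0) (some 4) = s.take 4 := by
      have := PySem.List.slice_natCast s 0 4
      simpa using this
    have hsl2 : PySem.List.slice s (some 4) none = s.drop 4 := by
      have := PySem.List.slice_from_natCast s 4
      simpa using this
    set u0 := PySem.List.sorted (s.take 4) (fun x => x) with hu0
    have hu0s : u0.Pairwise (· ≤ ·) := by
      simpa using PySem.List.sorted_pairwise (s.take 4) (fun x => x)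
    have hu0len : u0.length = 4 := by
      rw [hu0, PySem.List.length_sorted, List.length_take]; omega
    obtain ⟨p, q, r, t, rest, hdec⟩ := four_decomp u0 (by omega)
    have hrest : rest = [] := by
      have := hu0len; rw [hdec] at this; simpa using this
    subst hrest
    -- initial state is extract u0
    have hst0 :
        (⟨PySem.List.pyGetD u0 3 0, PySem.List.pyGetD u0 2 0, PySem.List.pyGetD u0 1 0,
          PySem.List.pyGetD u0 0 0,
          PySem.List.pyGetD u0 0 0, PySem.List.pyGetD u0 1 0, PySem.List.pyGetD u0 2 0,
          PySem.List.pyGetD u0 3 0⟩ : AmpState) = extract u0 := by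
      rw [hdec]
      simp [extract, front4, negrev, PySem.List.pyGetD]
    -- the fold computes extract (sorted s)
    have hfold : (s.drop 4).foldl ampStep (extract u0) = extract (PySem.List.sorted s (fun x => x)) := by
      rw [fold_extract _ u0 hu0s (by omega)]
      congr 1
      rw [sorted_eq_foldl_ins, ← List.take_append_drop 4 s, List.foldl_append]
      rw [List.take_append_drop]
      rfl
    rw [hsl1, hsl2, ← hu0, hst0, hfold]
    -- final arithmetic: read the eight entries of the sorted list
    set ts := PySem.List.sorted s (fun x => x) with hts
    have htslen : ts.length = s.length := by
      rw [hts]; simp [PySem.List.length_sorted]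
    have hnegrev : ∀ k : Nat, k < ts.length →
        (negrev ts).getD k 0 = -(ts.getD (ts.length - 1 - k) 0) := by
      intro k hk
      have hk' : k < (negrev ts).length := by rw [length_negrev]; exact hk
      have h1 : ts.length - 1 - k < ts.length := by omega
      rw [List.getD_eq_getElem?_getD, List.getD_eq_getElem?_getD,
        List.getElem?_eq_getElem hk', List.getElem?_eq_getElem h1]
      simp only [Option.getD_some]
      show (negrev ts)[k]'hk' = -ts[ts.length - 1 - k]'h1
      simp [negrev, List.getElem_reverse]
    have hneg : ∀ k : Nat, 0 < k → k ≤ ts.length →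
        PySem.List.pyGetD ts (-(k : Int)) 0 = ts.getD (ts.length - k) 0 := by
      intro k hk0 hk
      simp [PySem.List.pyGetD, PySem.List.pyGet?_neg_natCast ts k hk0 hk,
        List.getD_eq_getElem?_getD]
    have hlen' : 5 ≤ ts.length := by omega
    have e_min1 : (extract ts).min1 = PySem.List.pyGetD ts 0 0 := by
      simp [extract, front4, PySem.List.pyGetD_ofNat']
    have e_min2 : (extract ts).min2 = PySem.List.pyGetD ts 1 0 := by
      simp [extract, front4, PySem.List.pyGetD_ofNat']
    have e_min3 : (extract ts).min3 = PySem.List.pyGetD ts 2 0 := by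
      simp [extract, front4, PySem.List.pyGetD_ofNat']
    have e_min4 : (extract ts).min4 = PySem.List.pyGetD ts 3 0 := by
      simp [extract, front4, PySem.List.pyGetD_ofNat']
    have e_max1 : (extract ts).max1 = PySem.List.pyGetD ts (-1) 0 := by
      have h1 := hnegrev 0 (by omega)
      have h2 := hneg 1 (by omega) (by omega)
      have h3 : ts.length - 1 - 0 = ts.length - 1 := by omega
      simp only [h3] at h1
      simp only [Nat.cast_one] at h2
      have h4 : (extract ts).max1 = -((negrev ts).getD 0 0) := rfl
      rw [h4, h1, neg_neg, ← h2]
    have e_max2 : (extract ts).max2 = PySem.List.pyGetD ts (-2) 0 := by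
      have h1 := hnegrev 1 (by omega)
      have h2 := hneg 2 (by omega) (by omega)
      have h3 : ts.length - 1 - 1 = ts.length - 2 := by omega
      simp only [h3] at h1
      simp only [Nat.cast_ofNat] at h2
      have h4 : (extract ts).max2 = -((negrev ts).getD 1 0) := rfl
      rw [h4, h1, neg_neg, ← h2]
    have e_max3 : (extract ts).max3 = PySem.List.pyGetD ts (-3) 0 := by
      have h1 := hnegrev 2 (by omega)
      have h2 := hneg 3 (by omega) (by omega)
      have h3 : ts.length - 1 - 2 = ts.length - 3 := by omega
      simp only [h3] at h1
      simp only [Nat.cast_ofNat] at h2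
      have h4 : (extract ts).max3 = -((negrev ts).getD 2 0) := rfl
      rw [h4, h1, neg_neg, ← h2]
    have e_max4 : (extract ts).max4 = PySem.List.pyGetD ts (-4) 0 := by
      have h1 := hnegrev 3 (by omega)
      have h2 := hneg 4 (by omega) (by omega)
      have h3 : ts.length - 1 - 3 = ts.length - 4 := by omega
      simp only [h3] at h1
      simp only [Nat.cast_ofNat] at h2
      have h4 : (extract ts).max4 = -((negrev ts).getD 3 0) := rfl
      rw [h4, h1, neg_neg, ← h2]
    rw [e_max4, e_min1, e_max1, e_min4, e_max3, e_min2, e_max2, e_min3]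

-- ===== VERDICT (by name: the statement is the Claim_ definition above) =====
theorem minAmplitude_spec : Claim_equal_minAmplitude := by
  intro s _
  exact minAmplitude_eq_alt s
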